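-- pv_equiv track=rewrite | github.com/ggsaddy/jiangnan | jiangnan/holes/extract_allbe.py | classify_entity_by_layer_and_linetype
-- ===== SOURCE A (Python) =====
-- from typing import List, Dict, Tuple
--
-- def classify_entity_by_layer_and_linetype(entities: List[Dict]) -> Tuple[List[Dict], List[Dict], List[Dict]]:
--     """
--     根据图层名称和线型对实体进行分类
--
--     返回:
--     - regular_entities: 普通实体列表
--     - stiffener_entities: Stiffener图层实体列表
--     - discontinuous_entities: 非连续线型实体列表
--     """
--     regular_entities = []
--     stiffener_entities = []
--     discontinuous_entities = []
--
--     for entity in entities: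
--         layer_name = entity.get('layerName', '')
--         line_type = entity.get('linetype', 'Continuous')
--
--         # 检查是否为Stiffener图层
--         is_stiffener = layer_name in ['Stiffener_Visible', 'Stiffener_Invisible']
--
--         # 检查是否为非连续线型
--         is_discontinuous = line_type != 'Continuous'
--
--         if is_stiffener:
--             stiffener_entities.append(entity)
--         elif is_discontinuous:
--             discontinuous_entities.append(entity)
--         else:
--             regular_entities.append(entity)
--
--     return regular_entities, stiffener_entities, discontinuous_entities
-- ===== SOURCE B (Python) =====
-- def classify_entity_by_layer_and_linetype(entities):
--     stiff = {'Stiffener_Visible', 'Stiffener_Invisible'}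
--     stiffener_entities = [e for e in entities
--                           if e.get('layerName', '') in stiff]
--     discontinuous_entities = [e for e in entities
--                               if e.get('layerName', '') not in stiff
--                               and e.get('linetype', 'Continuous') != 'Continuous']
--     regular_entities = [e for e in entities
--                         if e.get('layerName', '') not in stiff
--                         and e.get('linetype', 'Continuous') == 'Continuous']
--     return regular_entities, stiffener_entities, discontinuous_entities
-- ===== Notes on version B (the rewrite author's own statement) =====
-- stated objective: alternative
-- what changed: Replaces the single accumulate-into-three-lists loop with three independent filter passes (list comprehensions), one per output category.
import Mathlib
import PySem

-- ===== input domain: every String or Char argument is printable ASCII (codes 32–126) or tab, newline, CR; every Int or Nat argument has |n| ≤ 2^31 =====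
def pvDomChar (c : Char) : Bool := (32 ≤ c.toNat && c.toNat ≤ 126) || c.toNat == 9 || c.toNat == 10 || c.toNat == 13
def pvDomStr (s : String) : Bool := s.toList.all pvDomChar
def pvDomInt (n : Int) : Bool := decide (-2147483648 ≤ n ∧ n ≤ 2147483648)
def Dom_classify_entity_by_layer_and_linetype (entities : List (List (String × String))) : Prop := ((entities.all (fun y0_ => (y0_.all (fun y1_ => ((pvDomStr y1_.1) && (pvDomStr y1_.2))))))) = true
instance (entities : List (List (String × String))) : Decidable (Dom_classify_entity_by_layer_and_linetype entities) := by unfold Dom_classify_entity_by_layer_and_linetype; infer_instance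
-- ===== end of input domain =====

-- B replaces A's single accumulate-into-three-lists loop with three independent filter passes (alternative decomposition, same cost).


-- shared dict primitive: Python's entity.get(k, dflt) on an assoc-list dict (first match)
def pvGet (e : List (String × String)) (k dflt : String) : String :=
  ((e.find? (fun p => p.1 == k)).map (fun p => p.2)).getD dflt

-- ===== PORT A =====
-- A-side helper: the loop body of A (one iteration of the for-loop)
def classify_step (acc : (List (List (String × String))) × (List (List (String × String))) × (List (List (String × String)))) (entity : List (String × String)) : (List (List (String × String))) × (List (List (String × String))) × (List (List (String × String))) :=
  let layer_name := pvGet entity "layerName" ""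
  let line_type := pvGet entity "linetype" "Continuous"
  let is_stiffener := layer_name ∈ ["Stiffener_Visible", "Stiffener_Invisible"]
  let is_discontinuous := line_type ≠ "Continuous"
  if is_stiffener then (acc.1, acc.2.1 ++ [entity], acc.2.2)
  else if is_discontinuous then (acc.1, acc.2.1, acc.2.2 ++ [entity])
  else (acc.1 ++ [entity], acc.2.1, acc.2.2)

def classify_entity_by_layer_and_linetype (entities : List (List (String × String))) : (List (List (String × String))) × (List (List (String × String))) × (List (List (String × String))) :=
  entities.foldl classify_step ([], [], [])

-- ===== PORT B =====
def pvIsStiff (e : List (String × String)) : Bool :=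
  pvGet e "layerName" "" == "Stiffener_Visible" || pvGet e "layerName" "" == "Stiffener_Invisible"

def classify_entity_by_layer_and_linetype_alt (entities : List (List (String × String))) : (List (List (String × String))) × (List (List (String × String))) × (List (List (String × String))) :=
  let stiffener_entities := entities.filter (fun e => pvIsStiff e)
  let discontinuous_entities := entities.filter (fun e => !pvIsStiff e && pvGet e "linetype" "Continuous" != "Continuous")
  let regular_entities := entities.filter (fun e => !pvIsStiff e && pvGet e "linetype" "Continuous" == "Continuous")
  (regular_entities, stiffener_entities, discontinuous_entities)

-- ===== PRECONDITION & SPEC =====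
def Spec_classify_entity_by_layer_and_linetype (entities : List (List (String × String))) (out : (List (List (String × String))) × (List (List (String × String))) × (List (List (String × String)))) : Prop := out = classify_entity_by_layer_and_linetype_alt entities
instance (entities : List (List (String × String))) (out : (List (List (String × String))) × (List (List (String × String))) × (List (List (String × String)))) : Decidable (Spec_classify_entity_by_layer_and_linetype entities out) := by unfold Spec_classify_entity_by_layer_and_linetype; infer_instance

-- ===== CLAIM (what is proved, stated in full; the proofs are below) =====
def Claim_equal_classify_entity_by_layer_and_linetype : Prop := ∀ (entities : List (List (String × String))), Dom_classify_entity_by_layer_and_linetype entities → Spec_classify_entity_by_layer_and_linetype entities (classify_entity_by_layer_and_linetype entities)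

-- ===== LEMMAS AND PROOFS =====
-- per-case reduction of A's loop body
theorem step_stiff (acc : (List (List (String × String))) × (List (List (String × String))) × (List (List (String × String)))) (e : List (String × String)) (hs : pvIsStiff e = true) :
    classify_step acc e = (acc.1, acc.2.1 ++ [e], acc.2.2) := by
  have hmem : pvGet e "layerName" "" ∈ ["Stiffener_Visible", "Stiffener_Invisible"] := by
    simp only [pvIsStiff, Bool.or_eq_true, beq_iff_eq] at hs
    simpa using hs
  simp [classify_step, hmem]

theorem step_disc (acc : (List (List (String × String))) × (List (List (String × String))) × (List (List (String × String)))) (e : List (String × String)) (hs : pvIsStiff e = false) (hd : pvGet e "linetype" "Continuous" ≠ "Continuous") :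
    classify_step acc e = (acc.1, acc.2.1, acc.2.2 ++ [e]) := by
  have hmem : pvGet e "layerName" "" ∉ ["Stiffener_Visible", "Stiffener_Invisible"] := by
    simp only [pvIsStiff, Bool.or_eq_false_iff, beq_eq_false_iff_ne, ne_eq] at hs
    simpa using hs
  simp [classify_step, hmem, hd]

theorem step_reg (acc : (List (List (String × String))) × (List (List (String × String))) × (List (List (String × String)))) (e : List (String × String)) (hs : pvIsStiff e = false) (hd : pvGet e "linetype" "Continuous" = "Continuous") :
    classify_step acc e = (acc.1 ++ [e], acc.2.1, acc.2.2) := by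
  have hmem : pvGet e "layerName" "" ∉ ["Stiffener_Visible", "Stiffener_Invisible"] := by
    simp only [pvIsStiff, Bool.or_eq_false_iff, beq_eq_false_iff_ne, ne_eq] at hs
    simpa using hs
  simp [classify_step, hmem, hd]

-- loop invariant: A's fold, started from arbitrary accumulators, appends exactly B's three filters
theorem classify_fold_inv (entities : List (List (String × String)))
    (r s d : List (List (String × String))) :
    entities.foldl classify_step (r, s, d) =
      (r ++ entities.filter (fun e => !pvIsStiff e && pvGet e "linetype" "Continuous" == "Continuous"),
       s ++ entities.filter (fun e => pvIsStiff e),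
       d ++ entities.filter (fun e => !pvIsStiff e && pvGet e "linetype" "Continuous" != "Continuous")) := by
  induction entities generalizing r s d with
  | nil => simp
  | cons e es ih =>
    rw [List.foldl_cons]
    by_cases hs : pvIsStiff e = true
    · rw [step_stiff _ _ hs, ih]
      simp [List.filter_cons, hs]
    · have hs' : pvIsStiff e = false := by simpa using hs
      by_cases hd : pvGet e "linetype" "Continuous" = "Continuous"
      · rw [step_reg _ _ hs' hd, ih]
        simp [List.filter_cons, hs', hd]
      · rw [step_disc _ _ hs' hd, ih]
        simp [List.filter_cons, hs', hd]

-- ===== VERDICT (by name: the statement is the Claim_ definition above) =====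
theorem classify_entity_by_layer_and_linetype_spec : Claim_equal_classify_entity_by_layer_and_linetype := by
  intro entities _
  unfold Spec_classify_entity_by_layer_and_linetype classify_entity_by_layer_and_linetype classify_entity_by_layer_and_linetype_alt
  simpa using classify_fold_inv entities [] [] []
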